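-- pv_equiv track=rewrite | github.com/Kim-kwan-woo/Woogorithm-2022 | baekjoon/1110.py | solution
-- ===== SOURCE A (Python) =====
-- def solution(N):
--     cycle = 0
--     tempNum = str(N)
--     while True:
--         cycle += 1
--
--         if len(tempNum) == 1:
--             tempNum += tempNum
--         else:
--             sumNum = int(tempNum[0]) + int(tempNum[1])
--             if len(str(sumNum)) == 1:
--                 tempNum = tempNum[1] + str(sumNum)[0]
--             else:
--                 tempNum = tempNum[1] + str(sumNum)[1]
--
--         if int(tempNum) == N:
--             return cycle
-- ===== SOURCE B (Python) =====
-- # Cycle length of the map (a,b) -> (b,(a+b)%10) starting from N = 10a+b.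
-- # That map is the linear action of M = [[0,1],[1,1]] mod 10, whose order is the
-- # Pisano period 60, so the answer is the smallest divisor d of 60 with M^d v = v;
-- # M^d entries are Fibonacci numbers, read off a precomputed Fibonacci-mod-10 table.
-- _FIB10 = [0, 1, 1, 2, 3, 5, 8, 3, 1, 4, 5, 9, 4, 3, 7, 0, 7, 7, 4, 1, 5, 6, 1, 7,
--           8, 5, 3, 8, 1, 9, 0, 9, 9, 8, 7, 5, 2, 7, 9, 6, 5, 1, 6, 7, 3, 0, 3, 3,
--           6, 9, 5, 4, 9, 3, 2, 5, 7, 2, 9, 1, 0, 1]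
--
-- def solution(N):
--     a, b = divmod(N, 10)
--     for d in (1, 2, 3, 4, 5, 6, 10, 12, 15, 20, 30, 60):
--         if (_FIB10[d - 1] * a + _FIB10[d] * b) % 10 == a and \
--            (_FIB10[d] * a + _FIB10[d + 1] * b) % 10 == b:
--             return d
-- ===== Notes on version B (the rewrite author's own statement) =====
-- stated objective: alternative
-- what changed: B abandons the state-iteration loop entirely: the step is the linear map [[0,1],[1,1]] mod 10 whose order is the Pisano period 60, so B returns the smallest divisor d of 60 with M^d fixing (N//10, N%10), reading M^d off a precomputed Fibonacci-mod-10 table (at most 12 constant-time checks, no simulation).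
import Mathlib
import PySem

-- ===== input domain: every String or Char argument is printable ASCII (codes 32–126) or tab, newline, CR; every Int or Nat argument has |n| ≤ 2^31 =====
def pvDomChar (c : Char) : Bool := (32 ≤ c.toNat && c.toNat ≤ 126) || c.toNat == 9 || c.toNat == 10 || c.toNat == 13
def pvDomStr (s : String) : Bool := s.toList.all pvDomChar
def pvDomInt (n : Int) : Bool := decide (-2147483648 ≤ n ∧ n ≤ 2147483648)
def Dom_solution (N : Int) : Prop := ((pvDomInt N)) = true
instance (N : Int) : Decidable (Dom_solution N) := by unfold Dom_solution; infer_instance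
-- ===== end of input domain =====

-- B replaces A's state-iteration loop by a closed-form group-order computation: the step is the
-- linear map [[0,1],[1,1]] mod 10 (order = Pisano period 60), so B returns the smallest divisor
-- d of 60 whose d-th matrix power (Fibonacci numbers, from a precomputed mod-10 table) fixes
-- (N//10, N%10) — at most 12 table checks instead of simulating the orbit (alternative).

-- ===== PORT A =====
-- A's while-True loop; strings ported as List Char (PySem.Chars side). Fuel 100 is a totality
-- guard only: under Pre_ (0 ≤ N ≤ 99) the cycle length is at most 60, so fuel is never exhausted.
-- The .getD defaults on pyGet?/ofChars? are likewise unreachable under Pre_.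
def solutionLoop (N : Int) (tempNum : List Char) (cycle : Int) : Nat → Int
  | 0 => 0
  | fuel + 1 =>
    let cycle := cycle + 1
    let tempNum :=
      if tempNum.length == 1 then tempNum ++ tempNum
      else
        let c0 := (PySem.List.pyGet? tempNum 0).getD '0'
        let c1 := (PySem.List.pyGet? tempNum 1).getD '0'
        let sumNum := (PySem.Int.ofChars? [c0]).getD 0 + (PySem.Int.ofChars? [c1]).getD 0
        let s := PySem.Int.toChars sumNum
        if s.length == 1 then [c1] ++ [(PySem.List.pyGet? s 0).getD '0']
        else [c1] ++ [(PySem.List.pyGet? s 1).getD '0']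
    if (PySem.Int.ofChars? tempNum).getD 0 == N then cycle
    else solutionLoop N tempNum cycle fuel

def solution (N : Int) : Int := solutionLoop N (PySem.Int.toChars N) 0 100

-- ===== PORT B =====
-- Source B's precomputed Fibonacci-mod-10 table.
def fibTab : List Int :=
  [0, 1, 1, 2, 3, 5, 8, 3, 1, 4, 5, 9, 4, 3, 7, 0, 7, 7, 4, 1, 5, 6, 1, 7,
   8, 5, 3, 8, 1, 9, 0, 9, 9, 8, 7, 5, 2, 7, 9, 6, 5, 1, 6, 7, 3, 0, 3, 3,
   6, 9, 5, 4, 9, 3, 2, 5, 7, 2, 9, 1, 0, 1]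

-- Source B's for-loop over the divisors of 60 with early return; falling off the loop
-- (Python: None) is unreachable under Pre_, ported as 0.
def solutionAltLoop (a b : Int) : List Int → Int
  | [] => 0
  | d :: rest =>
    let f0 := (PySem.List.pyGet? fibTab (d - 1)).getD 0
    let f1 := (PySem.List.pyGet? fibTab d).getD 0
    let f2 := (PySem.List.pyGet? fibTab (d + 1)).getD 0
    if PySem.Int.mod (f0 * a + f1 * b) 10 == a ∧ PySem.Int.mod (f1 * a + f2 * b) 10 == b then d
    else solutionAltLoop a b rest

def solution_alt (N : Int) : Int :=
  let a := PySem.Int.floordiv N 10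
  let b := PySem.Int.mod N 10
  solutionAltLoop a b [1, 2, 3, 4, 5, 6, 10, 12, 15, 20, 30, 60]

-- ===== PRECONDITION & SPEC =====
-- Pre_ excludes negative N, where A raises ValueError (int('-')), and N ≥ 100, where A's
-- two-character state can never equal N again and the while-True loop diverges.
def Pre_solution (N : Int) : Prop := 0 ≤ N ∧ N ≤ 99
instance (N : Int) : Decidable (Pre_solution N) := by unfold Pre_solution; infer_instance
def pvWitness_solution : Int := 26
def Spec_solution (N : Int) (out : Int) : Prop := out = solution_alt N
instance (N : Int) (out : Int) : Decidable (Spec_solution N out) := by unfold Spec_solution; infer_instance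

-- ===== CLAIM (what is proved, stated in full; the proofs are below) =====
def Claim_equal_solution : Prop := ∀ (N : Int), Dom_solution N → Pre_solution N → Spec_solution N (solution N)

-- ===== LEMMAS AND PROOFS =====

-- ===== VERDICT (by name: the statement is the Claim_ definition above) =====
set_option maxHeartbeats 4000000 in
theorem solution_spec : Claim_equal_solution := by
  unfold Claim_equal_solution
  intro N _ hPre
  unfold Pre_solution at hPre
  unfold Spec_solution
  obtain ⟨h0, h99⟩ := hPre
  interval_cases N <;> decide
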